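-- pv_equiv track=rewrite | github.com/Infinity233/Algorithm | leetcode/17. Letter Combinations of a Phone Number.py | getTimes
-- ===== SOURCE A (Python) =====
-- def getTimes(index, s):
--     if index + 1 == len(s):
--         return 1
--     sum = 1
--     for i in s[index + 1:]:
--         if i == '7' or i == '9':
--             sum *= 4
--         else:
--             sum *= 3
--     return sum
-- ===== SOURCE B (Python) =====
-- def getTimes(index, s):
--     sub = s[index + 1:]
--     c = sum(ch == '7' or ch == '9' for ch in sub)
--     return 4 ** c * 3 ** (len(sub) - c)
-- ===== Notes on version B (the rewrite author's own statement) =====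
-- stated objective: simpler
-- what changed: Replaced the multiply-in-a-loop over the suffix (with a special-cased empty-suffix branch) by a closed form: count the '7'/'9' characters in the suffix and return 4**count * 3**(rest).
import Mathlib
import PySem

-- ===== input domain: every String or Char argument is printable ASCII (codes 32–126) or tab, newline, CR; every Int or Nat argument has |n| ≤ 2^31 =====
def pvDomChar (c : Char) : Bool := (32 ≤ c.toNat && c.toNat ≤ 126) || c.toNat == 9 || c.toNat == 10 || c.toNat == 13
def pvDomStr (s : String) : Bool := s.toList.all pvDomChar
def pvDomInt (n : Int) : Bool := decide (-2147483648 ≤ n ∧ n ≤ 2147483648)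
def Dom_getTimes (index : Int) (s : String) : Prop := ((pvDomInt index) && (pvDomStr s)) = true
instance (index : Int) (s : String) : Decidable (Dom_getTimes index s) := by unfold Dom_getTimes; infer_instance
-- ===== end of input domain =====

-- B replaces A's multiply-in-a-loop over the suffix (and its special empty-suffix branch)
-- by a closed form 4^c * 3^(n-c) from one count of '7'/'9' characters; same cost, simpler.


-- ===== PORT A =====
def getTimes (index : Int) (s : String) : Int :=
  if index + 1 = PySem.List.len s.toList then 1
  else
    (PySem.List.slice s.toList (some (index + 1)) none).foldl
      (fun sum i => if i = '7' ∨ i = '9' then sum * 4 else sum * 3) 1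

-- ===== PORT B =====
def getTimes_alt (index : Int) (s : String) : Int :=
  let sub := PySem.List.slice s.toList (some (index + 1)) none
  let c := sub.countP (fun ch => ch == '7' || ch == '9')
  (4 : Int) ^ c * (3 : Int) ^ (sub.length - c)

-- ===== PRECONDITION & SPEC =====
def Spec_getTimes (index : Int) (s : String) (out : Int) : Prop := out = getTimes_alt index s
instance (index : Int) (s : String) (out : Int) : Decidable (Spec_getTimes index s out) := by unfold Spec_getTimes; infer_instance

-- ===== CLAIM (what is proved, stated in full; the proofs are below) =====
def Claim_equal_getTimes : Prop := ∀ (index : Int) (s : String), Dom_getTimes index s → Spec_getTimes index s (getTimes index s)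

-- ===== LEMMAS AND PROOFS =====

-- A's loop over any char list equals the closed form, for any accumulator.
theorem foldl_eq_pow (l : List Char) (a : Int) :
    l.foldl (fun sum i => if i = '7' ∨ i = '9' then sum * 4 else sum * 3) a
      = a * (4 : Int) ^ (l.countP (fun ch => ch == '7' || ch == '9'))
          * (3 : Int) ^ (l.length - l.countP (fun ch => ch == '7' || ch == '9')) := by
  induction l generalizing a with
  | nil => simp
  | cons x xs ih =>
    have hle := List.countP_le_length (p := fun ch => ch == '7' || ch == '9') (l := xs)
    by_cases hx : x = '7' ∨ x = '9'
    · have hb : (x == '7' || x == '9') = true := by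
        rcases hx with h | h <;> simp [h]
      simp only [List.foldl_cons, List.countP_cons, List.length_cons, hb, if_pos hx, ih, if_true]
      rw [show xs.length + 1 - (xs.countP (fun ch => ch == '7' || ch == '9') + 1)
            = xs.length - xs.countP (fun ch => ch == '7' || ch == '9') from by omega,
          pow_succ]
      ring
    · have hb : (x == '7' || x == '9') = false := by
        simp only [Bool.or_eq_false_iff, beq_eq_false_iff_ne]
        constructor <;> intro h <;> exact hx (by simp [h])
      simp only [List.foldl_cons, List.countP_cons, List.length_cons, hb, if_neg hx]
      simp only [if_neg (by simp : ¬ (false = true)), Nat.add_zero, ih]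
      rw [show xs.length + 1 - xs.countP (fun ch => ch == '7' || ch == '9')
            = (xs.length - xs.countP (fun ch => ch == '7' || ch == '9')) + 1 from by omega,
          pow_succ]
      ring

-- ===== VERDICT (by name: the statement is the Claim_ definition above) =====
theorem getTimes_spec : Claim_equal_getTimes := by
  intro index s _
  unfold Spec_getTimes getTimes getTimes_alt
  split_ifs with h
  · -- index + 1 = len s: the slice is empty, so the closed form is 1
    have : PySem.List.slice s.toList (some (index + 1)) none = [] := by
      rw [h, PySem.List.len_eq]
      rw [PySem.List.slice_from_natCast]
      simp
    simp [this]
  · rw [foldl_eq_pow]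
    ring
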